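-- pv_equiv track=rewrite | github.com/MickaelMasson/ca_feu | feu02.py | get_x_y_character_list
-- ===== SOURCE A (Python) =====
-- def get_x_y_character_list(string: str) -> list[tuple[int, int, str]]:
--
--     new_list = []
--     x = 0
--     y = 0
--     for character in string:
--         if character == "\n":
--             y += 1
--             x = 0
--             continue
--         if not character == " ":
--             new_list.append((x, y, character))
--         x += 1
--
--     return new_list
-- ===== SOURCE B (Python) =====
-- def get_x_y_character_list(string: str) -> list[tuple[int, int, str]]:
--     result = []
--     for y, line in enumerate(string.split('\n')):
--         for x, char in enumerate(line):
--             if char != ' ':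
--                 result.append((x, y, char))
--     return result
-- ===== Notes on version B (the rewrite author's own statement) =====
-- stated objective: simpler
-- what changed: Replaces the manual x/y counters with the newline-reset branch by splitting into lines and deriving both coordinates from nested enumerate loops.
import Mathlib
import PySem

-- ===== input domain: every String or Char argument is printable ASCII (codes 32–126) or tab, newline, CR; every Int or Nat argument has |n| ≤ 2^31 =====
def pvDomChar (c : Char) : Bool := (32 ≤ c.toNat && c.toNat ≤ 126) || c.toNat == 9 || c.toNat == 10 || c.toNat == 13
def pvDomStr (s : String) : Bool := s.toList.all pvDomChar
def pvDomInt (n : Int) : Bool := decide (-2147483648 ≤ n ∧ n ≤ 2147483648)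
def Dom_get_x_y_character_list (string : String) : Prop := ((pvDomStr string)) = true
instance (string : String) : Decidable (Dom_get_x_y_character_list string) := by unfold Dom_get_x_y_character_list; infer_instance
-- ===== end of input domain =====

-- B replaces A's manual x/y counters and newline-reset branch by split('\n') plus nested
-- enumerate loops (objective: simpler).

-- ===== PORT A =====
-- A-side helper: the body of A's single for-loop over the characters,
-- state = (new_list, x, y).
def feuStepA (st : List (Int × Int × String) × Int × Int) (c : Char) :
    List (Int × Int × String) × Int × Int :=
  if c = '\n' then (st.1, 0, st.2.2 + 1)
  else if ¬ (c = ' ') then (st.1 ++ [(st.2.1, st.2.2, String.mk [c])], st.2.1 + 1, st.2.2)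
  else (st.1, st.2.1 + 1, st.2.2)

def get_x_y_character_list (string : String) : List (Int × Int × String) :=
  (string.toList.foldl feuStepA ([], 0, 0)).1

-- ===== PORT B =====
-- B-side helper: B's inner loop 'for x, char in enumerate(line): if char != " ": append'.
def feuStepB (y : Int) (a : List (Int × Int × String)) (p : Int × Char) :
    List (Int × Int × String) :=
  if ¬ (p.2 = ' ') then a ++ [(p.1, y, String.mk [p.2])] else a

def feuRowB (y : Int) (acc : List (Int × Int × String)) (line : List Char) :
    List (Int × Int × String) :=
  (PySem.List.enumerate line 0).foldl (feuStepB y) acc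

def get_x_y_character_list_alt (string : String) : List (Int × Int × String) :=
  (PySem.List.enumerate (PySem.Chars.splitOn string.toList ['\n']) 0).foldl
    (fun acc p => feuRowB p.1 acc p.2) []

-- ===== PRECONDITION & SPEC =====
def Spec_get_x_y_character_list (string : String) (out : List (Int × Int × String)) : Prop := out = get_x_y_character_list_alt string
instance (string : String) (out : List (Int × Int × String)) : Decidable (Spec_get_x_y_character_list string out) := by unfold Spec_get_x_y_character_list; infer_instance

-- ===== CLAIM (what is proved, stated in full; the proofs are below) =====
def Claim_equal_get_x_y_character_list : Prop := ∀ (string : String), Dom_get_x_y_character_list string → Spec_get_x_y_character_list string (get_x_y_character_list string)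

-- ===== LEMMAS AND PROOFS =====

-- A simple structural split on '\n' (reference model of str.split('\n')).
def feuConsHead (c : Char) : List (List Char) → List (List Char)
  | [] => [[c]]
  | h :: t => (c :: h) :: t

def feuSplit : List Char → List (List Char)
  | [] => [[]]
  | c :: r => if c = '\n' then [] :: feuSplit r else feuConsHead c (feuSplit r)

lemma feuSplit_ne_nil (cs : List Char) : feuSplit cs ≠ [] := by
  cases cs with
  | nil => simp [feuSplit]
  | cons c r =>
    simp only [feuSplit]
    split_ifs
    · simp
    · cases h : feuSplit r <;> simp [feuConsHead]

def feuConsAll (pre : List Char) : List (List Char) → List (List Char)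
  | [] => [pre]
  | h :: t => (pre ++ h) :: t

lemma feuGo_eq : ∀ (fuel : Nat) (l cur : List Char) (acc : List (List Char)),
    l.length ≤ fuel →
    PySem.Chars.splitOn.go ['\n'] fuel l cur acc
      = acc.reverse ++ feuConsAll cur.reverse (feuSplit l) := by
  intro fuel
  induction fuel with
  | zero =>
    intro l cur acc h
    have : l = [] := List.length_eq_zero_iff.mp (Nat.le_zero.mp h)
    subst this
    simp [PySem.Chars.splitOn.go, feuSplit, feuConsAll]
  | succ n ih =>
    intro l cur acc h
    cases l with
    | nil => simp [PySem.Chars.splitOn.go, feuSplit, feuConsAll]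
    | cons c rest =>
      by_cases hc : c = '\n'
      · subst hc
        have hpre : List.isPrefixOf ['\n'] ('\n' :: rest) = true := by
          simp [List.isPrefixOf]
        rw [PySem.Chars.splitOn.go]
        simp only [hpre, if_true, List.length_cons, List.drop_succ_cons, List.length_nil,
          List.drop_zero]
        rw [ih rest [] (cur.reverse :: acc) (by simpa using Nat.succ_le_succ_iff.mp h)]
        have hne := feuSplit_ne_nil rest
        cases hs : feuSplit rest with
        | nil => exact absurd hs hne
        | cons h0 t0 =>
          simp [feuSplit, hs, feuConsAll]
      · have hpre : List.isPrefixOf ['\n'] (c :: rest) = false := by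
          simp [List.isPrefixOf]
          exact fun h' => absurd h'.symm hc
        rw [PySem.Chars.splitOn.go]
        simp only [hpre, Bool.false_eq_true, if_false]
        rw [ih rest (c :: cur) acc (by simpa using Nat.succ_le_succ_iff.mp h)]
        have hne := feuSplit_ne_nil rest
        cases hs : feuSplit rest with
        | nil => exact absurd hs hne
        | cons h0 t0 =>
          simp [feuSplit, hs, hc, feuConsAll, feuConsHead]

lemma feuSplitOn_eq (cs : List Char) :
    PySem.Chars.splitOn cs ['\n'] = feuSplit cs := by
  unfold PySem.Chars.splitOn
  rw [feuGo_eq (cs.length + 1) cs [] [] (Nat.le_succ _)]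
  have hne := feuSplit_ne_nil cs
  cases hs : feuSplit cs with
  | nil => exact absurd hs hne
  | cons h0 t0 => simp [feuConsAll]

-- Reference model of the nested loops: one row starting at column x, then the
-- remaining rows each starting at column 0.
def feuInner : List Char → Int → Int → List (Int × Int × String) → List (Int × Int × String)
  | [], _, _, acc => acc
  | c :: r, x, y, acc =>
      feuInner r (x + 1) y (if c = ' ' then acc else acc ++ [(x, y, String.mk [c])])

def feuLines : List (List Char) → Int → List (Int × Int × String) → List (Int × Int × String)
  | [], _, acc => acc
  | l :: ls, y, acc => feuLines ls (y + 1) (feuInner l 0 y acc)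

def feuCont : List (List Char) → Int → Int → List (Int × Int × String) → List (Int × Int × String)
  | [], _, _, acc => acc
  | h :: t, x, y, acc => feuLines t (y + 1) (feuInner h x y acc)

-- A's fold computes feuCont over the split of its input.
lemma feuFoldA_eq : ∀ (cs : List Char) (acc : List (Int × Int × String)) (x y : Int),
    (cs.foldl feuStepA (acc, x, y)).1 = feuCont (feuSplit cs) x y acc := by
  intro cs
  induction cs with
  | nil => intro acc x y; simp [feuSplit, feuCont, feuLines, feuInner]
  | cons c r ih =>
    intro acc x y
    by_cases hc : c = '\n'
    · subst hc
      simp only [List.foldl_cons, feuStepA, if_true]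
      rw [ih]
      have hne := feuSplit_ne_nil r
      cases hs : feuSplit r with
      | nil => exact absurd hs hne
      | cons h0 t0 => simp [feuSplit, hs, feuCont, feuLines, feuInner]
    · by_cases hsp : c = ' '
      · subst hsp
        have hstep : feuStepA (acc, x, y) ' ' = (acc, x + 1, y) := by simp [feuStepA]
        rw [List.foldl_cons, hstep, ih]
        have hne := feuSplit_ne_nil r
        cases hs : feuSplit r with
        | nil => exact absurd hs hne
        | cons h0 t0 =>
          simp [feuSplit, hs, feuCont, feuConsHead, feuInner]
      · simp only [List.foldl_cons, feuStepA, if_neg hc, if_pos hsp]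
        rw [ih]
        have hne := feuSplit_ne_nil r
        cases hs : feuSplit r with
        | nil => exact absurd hs hne
        | cons h0 t0 =>
          simp [feuSplit, hs, hc, feuCont, feuConsHead, feuInner, hsp]

-- B's inner enumerate-fold is feuInner.
lemma feuRowB_eq : ∀ (l : List Char) (x y : Int) (acc : List (Int × Int × String)),
    (PySem.List.enumerate l x).foldl (feuStepB y) acc = feuInner l x y acc := by
  intro l
  induction l with
  | nil => intro x y acc; simp [PySem.List.enumerate_nil, feuInner]
  | cons c r ih =>
    intro x y acc
    rw [PySem.List.enumerate_cons, List.foldl_cons]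
    by_cases hsp : c = ' '
    · have hstep : feuStepB y acc (x, c) = acc := by simp [feuStepB, hsp]
      rw [hstep, ih]
      simp [feuInner, hsp]
    · have hstep : feuStepB y acc (x, c) = acc ++ [(x, y, String.mk [c])] := by
        simp [feuStepB, hsp]
      rw [hstep, ih]
      simp [feuInner, hsp]

-- B's outer enumerate-fold is feuLines.
lemma feuLinesB_eq : ∀ (lines : List (List Char)) (y : Int) (acc : List (Int × Int × String)),
    (PySem.List.enumerate lines y).foldl (fun acc p => feuRowB p.1 acc p.2) acc
      = feuLines lines y acc := by
  intro lines
  induction lines with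
  | nil => intro y acc; simp [PySem.List.enumerate_nil, feuLines]
  | cons l ls ih =>
    intro y acc
    rw [PySem.List.enumerate_cons]
    simp only [List.foldl_cons]
    rw [ih]
    have hrow : feuRowB y acc l = feuInner l 0 y acc := by
      rw [feuRowB]; exact feuRowB_eq l 0 y acc
    show feuLines ls (y + 1) (feuRowB y acc l) = _
    rw [hrow]
    simp [feuLines]

-- ===== VERDICT (by name: the statement is the Claim_ definition above) =====
theorem get_x_y_character_list_spec : Claim_equal_get_x_y_character_list := by
  intro s _
  unfold Spec_get_x_y_character_list get_x_y_character_list get_x_y_character_list_alt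
  rw [feuSplitOn_eq, feuLinesB_eq, feuFoldA_eq]
  have hne := feuSplit_ne_nil s.toList
  cases hs : feuSplit s.toList with
  | nil => exact absurd hs hne
  | cons h0 t0 => simp [feuCont, feuLines]
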